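-- pv_equiv track=rewrite | github.com/Nchpg/Advent-of-Code-2024 | Day7/part1.py | compute
-- ===== SOURCE A (Python) =====
-- def compute(r, n):
--     if len(n) == 1:
--         return [n[0]]
--     x = compute(r, n[:-1])
--     L = []
--     for y in x:
--         L.append(y * n[-1])
--     for y in x:
--         L.append(y + n[-1])
--     return L
-- ===== SOURCE B (Python) =====
-- def compute(r, n):
--     results = [n[0]]
--     for m in n[1:]:
--         results = [y * m for y in results] + [y + m for y in results]
--     return results
-- ===== Notes on version B (the rewrite author's own statement) =====
-- stated objective: simpler
-- what changed: Replaced the right-peeling recursion (compute(n[:-1]) plus two append loops) by a single iterative left-to-right fold that rebuilds the result list with two comprehensions per element, preserving the exact multiply-before-add ordering.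
-- outside the precondition, e.g. on compute(0, []): A raises RecursionError, B raises IndexError
import Mathlib
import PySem

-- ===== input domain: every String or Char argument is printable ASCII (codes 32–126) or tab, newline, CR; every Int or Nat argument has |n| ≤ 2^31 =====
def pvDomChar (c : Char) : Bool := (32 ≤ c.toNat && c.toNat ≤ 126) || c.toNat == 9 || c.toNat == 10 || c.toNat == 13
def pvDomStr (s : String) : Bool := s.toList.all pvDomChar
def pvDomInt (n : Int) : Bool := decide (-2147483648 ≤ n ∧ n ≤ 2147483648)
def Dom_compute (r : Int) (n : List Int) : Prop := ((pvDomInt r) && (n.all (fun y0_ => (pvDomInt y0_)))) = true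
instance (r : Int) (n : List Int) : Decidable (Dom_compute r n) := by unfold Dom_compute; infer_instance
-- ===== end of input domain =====

-- B replaces A's right-peeling recursion by an iterative left-to-right fold (objective: simpler);
-- Pre_ excludes n = [], where A hits a RecursionError and B an IndexError.


-- ===== PORT A =====
def compute (r : Int) (n : List Int) : List Int :=
  if n = [] then []  -- Python recurses forever here (RecursionError); excluded by Pre_compute
  else if n.length = 1 then [(PySem.List.pyGet? n 0).getD 0]
  else
    let x := compute r (PySem.List.slice n none (some (-1)))   -- n[:-1]
    let last := (PySem.List.pyGet? n (-1)).getD 0              -- n[-1]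
    let L := x.foldl (fun L y => L ++ [y * last]) []
    x.foldl (fun L y => L ++ [y + last]) L
termination_by n.length
decreasing_by
  simp only [PySem.List.slice_to_neg_one, List.length_dropLast]
  have : n.length ≠ 0 := by simpa [List.length_eq_zero_iff] using ‹¬ n = []›
  omega

-- ===== PORT B =====
def compute_alt (r : Int) (n : List Int) : List Int :=
  match n with
  | [] => []   -- Source B raises IndexError here; excluded by Pre_compute
  | a :: rest =>
    rest.foldl (fun results m =>
      results.map (fun y => y * m) ++ results.map (fun y => y + m)) [a]

-- ===== PRECONDITION & SPEC =====
-- Pre_ excludes exactly the empty list, on which A raises RecursionError (and B IndexError).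
def Pre_compute (r : Int) (n : List Int) : Prop := n ≠ []
instance (r : Int) (n : List Int) : Decidable (Pre_compute r n) := by unfold Pre_compute; infer_instance
def pvWitness_compute : Int × List Int := (0, [2, 3, 4])

def Spec_compute (r : Int) (n : List Int) (out : List Int) : Prop := out = compute_alt r n
instance (r : Int) (n : List Int) (out : List Int) : Decidable (Spec_compute r n out) := by unfold Spec_compute; infer_instance

-- ===== CLAIM (what is proved, stated in full; the proofs are below) =====
def Claim_equal_compute : Prop := ∀ (r : Int) (n : List Int), Dom_compute r n → Pre_compute r n → Spec_compute r n (compute r n)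

-- ===== LEMMAS AND PROOFS =====

-- A's append loop is init ++ map
theorem foldl_append_map (f : Int → Int) (xs init : List Int) :
    xs.foldl (fun L y => L ++ [f y]) init = init ++ xs.map f := by
  induction xs generalizing init with
  | nil => simp
  | cons a t ih => simp [List.foldl, ih]

theorem compute_eq_alt (r a : Int) (rest : List Int) :
    compute r (a :: rest) = compute_alt r (a :: rest) := by
  induction rest using List.reverseRecOn with
  | nil =>
    rw [compute]
    simp [compute_alt]
  | append_singleton rs m ih =>
    rw [compute]
    have hne : a :: (rs ++ [m]) ≠ [] := by simp
    have hlen : (a :: (rs ++ [m])).length ≠ 1 := by simp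
    simp only [hne, hlen, if_false]
    have hslice : PySem.List.slice (a :: (rs ++ [m])) none (some (-1)) = a :: rs := by
      rw [PySem.List.slice_to_neg_one]
      simpa using (List.dropLast_concat (l₁ := a :: rs) (b := m))
    have hlast : (PySem.List.pyGet? (a :: (rs ++ [m])) (-1)).getD 0 = m := by
      have h : a :: (rs ++ [m]) = (a :: rs) ++ [m] := by simp
      rw [h, PySem.List.pyGet?_neg_one_append_singleton]
      rfl
    rw [hslice, hlast, ih]
    simp only [foldl_append_map, List.nil_append]
    simp [compute_alt, List.foldl_append]

-- ===== VERDICT (by name: the statement is the Claim_ definition above) =====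
theorem compute_spec : Claim_equal_compute := by
  intro r n _ hpre
  unfold Spec_compute
  match n with
  | [] => exact absurd rfl hpre
  | a :: rest => exact compute_eq_alt r a rest
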